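-- pv_equiv track=rewrite | github.com/miyamurazxc/dota-ai-assistant | src/rules.py | infer_team_needs
-- ===== SOURCE A (Python) =====
-- from typing import Iterable
--
-- def infer_team_needs(allies: list[str], enemies: list[str]) -> set[str]:
--     allies_l = [a.lower() for a in allies]
--     enemies_l = [e.lower() for e in enemies]
--
--     needs: set[str] = set()
--
--     disable_count = 0
--     save_count = 0
--     push_count = 0
--     frontline_count = 0
--
--     def has(hero: str, keywords: Iterable[str]) -> bool:
--         hero = hero.lower()
--         for k in keywords:
--             if k.lower() in hero:
--                 return True
--         return False
--
--     for a in allies_l: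
--         if a in ["lion", "shadow shaman", "crystal maiden", "puck", "axe", "magnus"]:
--             disable_count += 1
--         if a in ["oracle", "dazzle"]:
--             save_count += 1
--         if a in ["shadow shaman", "drow ranger"]:
--             push_count += 1
--         if a in ["axe", "bristleback"]:
--             frontline_count += 1
--
--     if disable_count < 1:
--         needs.add("disable")
--     if save_count < 1:
--         needs.add("save")
--     if frontline_count < 1:
--         needs.add("frontline")
--     if push_count < 1:
--         needs.add("push")
--
--     if "storm spirit" in enemies_l and disable_count < 2:
--         needs.add("instant_disable")
--     if "phantom assassin" in enemies_l:
--         needs.add("anti_pa")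
--
--     return needs
-- ===== SOURCE B (Python) =====
-- DISABLERS = ["lion", "shadow shaman", "crystal maiden", "puck", "axe", "magnus"]
-- SAVERS = ["oracle", "dazzle"]
-- PUSHERS = ["shadow shaman", "drow ranger"]
-- FRONTLINERS = ["axe", "bristleback"]
--
--
-- def infer_team_needs(allies: list[str], enemies: list[str]) -> set[str]:
--     # Build a multiplicity map of the lowercased allies once,
--     # then count each role by summing over that role's hero list.
--     cnt: dict[str, int] = {}
--     for a in allies:
--         k = a.lower()
--         cnt[k] = cnt.get(k, 0) + 1
--
--     disable_count = sum(cnt.get(h, 0) for h in DISABLERS)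
--     save_count = sum(cnt.get(h, 0) for h in SAVERS)
--     push_count = sum(cnt.get(h, 0) for h in PUSHERS)
--     frontline_count = sum(cnt.get(h, 0) for h in FRONTLINERS)
--
--     enemies_l = [e.lower() for e in enemies]
--
--     needs: set[str] = set()
--     if disable_count < 1:
--         needs.add("disable")
--     if save_count < 1:
--         needs.add("save")
--     if frontline_count < 1:
--         needs.add("frontline")
--     if push_count < 1:
--         needs.add("push")
--     if "storm spirit" in enemies_l and disable_count < 2:
--         needs.add("instant_disable")
--     if "phantom assassin" in enemies_l:
--         needs.add("anti_pa")
--     return needs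
-- ===== Notes on version B (the rewrite author's own statement) =====
-- stated objective: alternative
-- what changed: Replaces A's per-ally loop that increments four role counters with a multiplicity dict of the lowercased allies built once, computing each role count by summing the dict over that role's hero list; the unused 'has' helper is dropped.
import Mathlib
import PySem

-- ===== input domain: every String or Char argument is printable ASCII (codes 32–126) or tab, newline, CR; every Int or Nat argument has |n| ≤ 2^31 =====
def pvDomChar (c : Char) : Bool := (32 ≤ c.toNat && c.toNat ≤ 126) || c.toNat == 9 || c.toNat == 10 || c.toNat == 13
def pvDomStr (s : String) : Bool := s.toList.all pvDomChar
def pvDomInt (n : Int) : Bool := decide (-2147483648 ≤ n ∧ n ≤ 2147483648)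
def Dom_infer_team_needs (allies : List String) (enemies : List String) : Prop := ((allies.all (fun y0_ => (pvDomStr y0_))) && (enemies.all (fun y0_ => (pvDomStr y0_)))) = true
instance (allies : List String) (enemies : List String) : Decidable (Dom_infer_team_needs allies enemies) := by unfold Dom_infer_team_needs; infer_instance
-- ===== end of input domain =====

-- B replaces A's per-ally loop over four counters by a multiplicity map of the lowercased
-- allies built once, each role count being the sum of that map over the role's hero list
-- (same thresholds, same resulting set); objective: alternative decomposition.

-- ===== PORT A =====
-- the body of A's for-loop: the four membership tests, in A's order, on the 4-tuple
-- (disable_count, save_count, push_count, frontline_count)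
def stepA (c : Int × Int × Int × Int) (a : String) : Int × Int × Int × Int :=
  let c := if (["lion", "shadow shaman", "crystal maiden", "puck", "axe", "magnus"] : List String).contains a then (c.1 + 1, c.2.1, c.2.2.1, c.2.2.2) else c
  let c := if (["oracle", "dazzle"] : List String).contains a then (c.1, c.2.1 + 1, c.2.2.1, c.2.2.2) else c
  let c := if (["shadow shaman", "drow ranger"] : List String).contains a then (c.1, c.2.1, c.2.2.1 + 1, c.2.2.2) else c
  if (["axe", "bristleback"] : List String).contains a then (c.1, c.2.1, c.2.2.1, c.2.2.2 + 1) else c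

def infer_team_needs (allies : List String) (enemies : List String) : List String :=
  let allies_l := allies.map PySem.Str.lower
  let enemies_l := enemies.map PySem.Str.lower
  let counts := allies_l.foldl stepA ((0, 0, 0, 0) : Int × Int × Int × Int)
  let needs : PySem.Set String := PySem.Set.empty
  let needs := if counts.1 < 1 then needs.add "disable" else needs
  let needs := if counts.2.1 < 1 then needs.add "save" else needs
  let needs := if counts.2.2.2 < 1 then needs.add "frontline" else needs
  let needs := if counts.2.2.1 < 1 then needs.add "push" else needs
  let needs := if enemies_l.contains "storm spirit" && counts.1 < 2 then needs.add "instant_disable" else needs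
  let needs := if enemies_l.contains "phantom assassin" then needs.add "anti_pa" else needs
  needs

-- ===== PORT B =====
def catDisable : List String := ["lion", "shadow shaman", "crystal maiden", "puck", "axe", "magnus"]
def catSave : List String := ["oracle", "dazzle"]
def catPush : List String := ["shadow shaman", "drow ranger"]
def catFront : List String := ["axe", "bristleback"]

def infer_team_needs_alt (allies : List String) (enemies : List String) : List String :=
  -- cnt[k] = cnt.get(k, 0) + 1 is exactly Dict.modify k 0 (· + 1)
  let cnt : PySem.Dict String Int :=
    allies.foldl (fun d a => d.modify (PySem.Str.lower a) 0 (fun x => x + 1)) PySem.Dict.empty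
  let disable_count := (catDisable.map (fun h => cnt.getD h 0)).sum
  let save_count := (catSave.map (fun h => cnt.getD h 0)).sum
  let push_count := (catPush.map (fun h => cnt.getD h 0)).sum
  let frontline_count := (catFront.map (fun h => cnt.getD h 0)).sum
  let enemies_l := enemies.map PySem.Str.lower
  let needs : PySem.Set String := PySem.Set.empty
  let needs := if disable_count < 1 then needs.add "disable" else needs
  let needs := if save_count < 1 then needs.add "save" else needs
  let needs := if frontline_count < 1 then needs.add "frontline" else needs
  let needs := if push_count < 1 then needs.add "push" else needs
  let needs := if enemies_l.contains "storm spirit" && disable_count < 2 then needs.add "instant_disable" else needs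
  let needs := if enemies_l.contains "phantom assassin" then needs.add "anti_pa" else needs
  needs

-- ===== PRECONDITION & SPEC =====
def Spec_infer_team_needs (allies : List String) (enemies : List String) (out : List String) : Prop := out = infer_team_needs_alt allies enemies
instance (allies : List String) (enemies : List String) (out : List String) : Decidable (Spec_infer_team_needs allies enemies out) := by unfold Spec_infer_team_needs; infer_instance

-- ===== CLAIM (what is proved, stated in full; the proofs are below) =====
def Claim_equal_infer_team_needs : Prop := ∀ (allies : List String) (enemies : List String), Dom_infer_team_needs allies enemies → Spec_infer_team_needs allies enemies (infer_team_needs allies enemies)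

-- ===== LEMMAS AND PROOFS =====

-- A's loop step adds the 0/1 indicator of each category to its counter
lemma stepA_eq (c : Int × Int × Int × Int) (a : String) :
    stepA c a
      = (c.1 + (if (["lion", "shadow shaman", "crystal maiden", "puck", "axe", "magnus"] : List String).contains a then (1 : Int) else 0),
         c.2.1 + (if (["oracle", "dazzle"] : List String).contains a then (1 : Int) else 0),
         c.2.2.1 + (if (["shadow shaman", "drow ranger"] : List String).contains a then (1 : Int) else 0),
         c.2.2.2 + (if (["axe", "bristleback"] : List String).contains a then (1 : Int) else 0)) := by
  unfold stepA
  dsimp only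
  split_ifs <;> simp

-- sum over a duplicate-free list L of the ite-indicator of a is the indicator of a ∈ L
lemma sum_map_ite_beq (L : List String) (hL : L.Nodup) (a : String) :
    (L.map (fun h => if (a == h) = true then (1 : Int) else 0)).sum
      = if L.contains a then 1 else 0 := by
  induction L with
  | nil => simp
  | cons h L ih =>
    rcases List.nodup_cons.mp hL with ⟨hnm, hnd⟩
    rw [List.map_cons, List.sum_cons, ih hnd]
    by_cases hah : a = h
    · subst hah
      simp
      exact hnm
    · simp [hah]

-- summing the multiplicities of the heroes of a duplicate-free category list L over xs
-- is counting the elements of xs that belong to L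
lemma sum_map_count_eq_countP (L : List String) (hL : L.Nodup) (xs : List String) :
    (L.map (fun h => (xs.count h : Int))).sum
      = ((xs.countP (fun a => L.contains a) : Nat) : Int) := by
  induction xs with
  | nil => simp
  | cons a xs ih =>
    have hcount : (L.map (fun h => (((a :: xs).count h : Nat) : Int)))
        = (L.map (fun h => ((xs.count h : Nat) : Int) + (if (a == h) = true then (1 : Int) else 0))) := by
      apply List.map_congr_left
      intro h _
      rw [List.count_cons]
      push_cast
      ring
    rw [hcount, PySem.List.sum_map_add_int, ih, sum_map_ite_beq L hL a,
      List.countP_cons]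
    push_cast
    split_ifs <;> simp_all

-- A's four-counter fold computes the four countP's
lemma foldA_counts (xs : List String) : ∀ (c : Int × Int × Int × Int),
    xs.foldl stepA c
    = (c.1 + ((xs.countP (fun a => (["lion", "shadow shaman", "crystal maiden", "puck", "axe", "magnus"] : List String).contains a) : Nat) : Int),
       c.2.1 + ((xs.countP (fun a => (["oracle", "dazzle"] : List String).contains a) : Nat) : Int),
       c.2.2.1 + ((xs.countP (fun a => (["shadow shaman", "drow ranger"] : List String).contains a) : Nat) : Int),
       c.2.2.2 + ((xs.countP (fun a => (["axe", "bristleback"] : List String).contains a) : Nat) : Int)) := by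
  induction xs with
  | nil => intro c; simp
  | cons a xs ih =>
    intro c
    rw [List.foldl_cons, ih (stepA c a), stepA_eq]
    simp only [List.countP_cons, Prod.mk.injEq]
    refine ⟨?_, ?_, ?_, ?_⟩ <;> (push_cast; split_ifs <;> (simp_all; try ring))

-- ===== VERDICT (by name: the statement is the Claim_ definition above) =====
theorem infer_team_needs_spec : Claim_equal_infer_team_needs := by
  intro allies enemies _
  unfold Spec_infer_team_needs
  have hcnt : allies.foldl (fun d a => d.modify (PySem.Str.lower a) 0 (fun x => x + 1)) PySem.Dict.empty
      = PySem.Dict.counter (allies.map PySem.Str.lower) := by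
    rw [PySem.Dict.counter_eq_foldl, List.foldl_map]
  simp only [infer_team_needs, infer_team_needs_alt, hcnt, foldA_counts,
    PySem.Dict.getD_counter, catDisable, catSave, catPush, catFront,
    sum_map_count_eq_countP ["lion", "shadow shaman", "crystal maiden", "puck", "axe", "magnus"] (by decide) (allies.map PySem.Str.lower),
    sum_map_count_eq_countP ["oracle", "dazzle"] (by decide) (allies.map PySem.Str.lower),
    sum_map_count_eq_countP ["shadow shaman", "drow ranger"] (by decide) (allies.map PySem.Str.lower),
    sum_map_count_eq_countP ["axe", "bristleback"] (by decide) (allies.map PySem.Str.lower),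
    zero_add]
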